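-- pv_equiv track=rewrite | github.com/sellisd/mlemhelper | mlemhelper/mlemhelper.py | level_profile_to_counts
-- ===== SOURCE A (Python) =====
-- def level_profile_to_counts(roll:list):
--   doubles = 0
--   numbers = 0
--   for i in roll:
--     if i == '2':
--       doubles +=1
--     else:
--       numbers +=1
--   return {'doubles':doubles,'numbers':numbers}
-- ===== SOURCE B (Python) =====
-- def level_profile_to_counts(roll:list):
--   partition = {'doubles': [x for x in roll if x == '2'],
--                'numbers': [x for x in roll if x != '2']}
--   return {k: len(v) for k, v in partition.items()}
-- ===== Notes on version B (the rewrite author's own statement) =====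
-- stated objective: alternative
-- what changed: Instead of one pass with two running counters and an if/else, B partitions the list into the two materialized sublists (the '2's and the rest) via staged filter passes and then measures their lengths.
import Mathlib
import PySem

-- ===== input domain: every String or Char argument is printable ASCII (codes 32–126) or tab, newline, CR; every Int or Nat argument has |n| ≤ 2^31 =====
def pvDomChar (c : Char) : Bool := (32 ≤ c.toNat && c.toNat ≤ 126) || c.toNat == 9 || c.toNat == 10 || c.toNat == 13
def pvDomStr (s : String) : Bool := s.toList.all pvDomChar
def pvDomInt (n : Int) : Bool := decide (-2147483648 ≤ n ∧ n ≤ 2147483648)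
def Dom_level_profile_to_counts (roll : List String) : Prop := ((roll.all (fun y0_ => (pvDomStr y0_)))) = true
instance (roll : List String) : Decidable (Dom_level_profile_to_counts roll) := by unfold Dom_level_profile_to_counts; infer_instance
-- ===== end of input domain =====

-- B partitions the list into the two materialized sublists ('2's and the rest) and measures their lengths, instead of A's single pass with two counters (objective: alternative).
-- ===== PORT A =====
-- Literal port of A: fold over roll with two counters, if/else branch in order.
def level_profile_to_counts (roll : List String) : List (String × Int) :=
  let st := roll.foldl (fun (st : Int × Int) i =>
    if i == "2" then (st.1 + 1, st.2) else (st.1, st.2 + 1)) (0, 0)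
  [("doubles", st.1), ("numbers", st.2)]

-- ===== PORT B =====
-- Port of B: build the two filtered sublists, then map len over the association list.
def level_profile_to_counts_alt (roll : List String) : List (String × Int) :=
  let partition : List (String × List String) :=
    [("doubles", roll.filter (fun x => x == "2")),
     ("numbers", roll.filter (fun x => x != "2"))]
  partition.map (fun kv => (kv.1, (kv.2.length : Int)))

-- ===== PRECONDITION & SPEC =====
def Spec_level_profile_to_counts (roll : List String) (out : List (String × Int)) : Prop := out = level_profile_to_counts_alt roll
instance (roll : List String) (out : List (String × Int)) : Decidable (Spec_level_profile_to_counts roll out) := by unfold Spec_level_profile_to_counts; infer_instance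

-- ===== CLAIM (what is proved, stated in full; the proofs are below) =====
def Claim_equal_level_profile_to_counts : Prop := ∀ (roll : List String), Dom_level_profile_to_counts roll → Spec_level_profile_to_counts roll (level_profile_to_counts roll)

-- ===== LEMMAS AND PROOFS =====
theorem pv_fold_inv (roll : List String) (d n : Int) :
    roll.foldl (fun (st : Int × Int) i =>
      if i == "2" then (st.1 + 1, st.2) else (st.1, st.2 + 1)) (d, n)
      = (d + ((roll.filter (fun x => x == "2")).length : Int),
         n + ((roll.filter (fun x => x != "2")).length : Int)) := by
  induction roll generalizing d n with
  | nil => simp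
  | cons h t ih =>
    rw [List.foldl_cons]
    by_cases hh : h == "2"
    · rw [if_pos hh, ih]
      simp [show h = "2" from by simpa using hh]
      omega
    · rw [if_neg hh, ih]
      simp [show ¬ h = "2" from by simpa using hh]
      omega

-- ===== VERDICT (by name: the statement is the Claim_ definition above) =====
theorem level_profile_to_counts_spec : Claim_equal_level_profile_to_counts := by
  intro roll _
  unfold Spec_level_profile_to_counts level_profile_to_counts level_profile_to_counts_alt
  rw [pv_fold_inv]
  simp
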